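-- pv_equiv track=rewrite | github.com/ghltorrhdiddl2/codingtest | p_level1_sj/nov/nov_9/moie.py | solution
-- ===== SOURCE A (Python) =====
-- def solution(answers):
--     s1 = [1,2,3,4,5]
--     s2 = [2,1,2,3,2,4,2,5]
--     s3 = [3,3,1,1,2,2,4,4,5,5]
--     score = [0,0,0]; result = []
--
--     for i, v in enumerate(answers):
--         if v == s1[i%len(s1)]:
--             score[0] += 1
--         if v == s2[i%len(s2)]:
--             score[1] += 1
--         if v == s3[i%len(s3)]:
--             score[2] += 1
--
--     for j, v in enumerate(score):
--         if v == max(score):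
--             result.append(j+1)
--     return result
-- ===== SOURCE B (Python) =====
-- def solution(answers):
--     # Build a frequency table keyed by (position mod 40, answer) in one pass
--     # (40 = lcm of the three pattern lengths); scores are then read off the
--     # table with 40 lookups per pattern, never rescanning the answers.
--     freq = {}
--     for i, v in enumerate(answers):
--         k = (i % 40, v)
--         freq[k] = freq.get(k, 0) + 1
--     patterns = [
--         [1, 2, 3, 4, 5],
--         [2, 1, 2, 3, 2, 4, 2, 5],
--         [3, 3, 1, 1, 2, 2, 4, 4, 5, 5],
--     ]
--     scores = [sum(freq.get((r, p[r % len(p)]), 0) for r in range(40))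
--               for p in patterns]
--     best = max(scores)
--     return [j + 1 for j, s in enumerate(scores) if s == best]
-- ===== Notes on version B (the rewrite author's own statement) =====
-- stated objective: alternative
-- what changed: Replaces A's single interleaved pass that compares each answer against all three cyclic patterns with a frequency table: one pass builds a dict counting occurrences of (index mod 40, answer) pairs (40 = lcm of the pattern lengths), and each pattern's score is then read off the table with 40 lookups, never rescanning the answers.
import Mathlib
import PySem

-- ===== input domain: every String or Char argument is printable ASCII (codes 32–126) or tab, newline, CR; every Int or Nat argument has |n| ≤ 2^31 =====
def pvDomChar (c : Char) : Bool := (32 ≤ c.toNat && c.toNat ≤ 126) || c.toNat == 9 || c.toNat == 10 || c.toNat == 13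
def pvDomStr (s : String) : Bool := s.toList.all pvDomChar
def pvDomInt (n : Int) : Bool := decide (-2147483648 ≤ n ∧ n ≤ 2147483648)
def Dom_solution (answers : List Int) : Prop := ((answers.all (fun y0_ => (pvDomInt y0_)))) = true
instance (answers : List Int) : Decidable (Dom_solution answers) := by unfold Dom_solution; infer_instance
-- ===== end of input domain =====

-- B replaces A's single interleaved comparison pass with a frequency table keyed by
-- (index mod 40, answer) built in one pass; scores are read from the table afterwards.
-- Alternative decomposition/data structure, same asymptotic cost.

-- ===== PORT A =====
-- A's loop body: three sequential ifs mutating the three-slot score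
def pvStepA (sc : Int × Int × Int) (iv : Int × Int) : Int × Int × Int :=
  let sc := if iv.2 = PySem.List.pyGetD [1,2,3,4,5] (PySem.Int.mod iv.1 5) 0
            then (sc.1 + 1, sc.2.1, sc.2.2) else sc
  let sc := if iv.2 = PySem.List.pyGetD [2,1,2,3,2,4,2,5] (PySem.Int.mod iv.1 8) 0
            then (sc.1, sc.2.1 + 1, sc.2.2) else sc
  if iv.2 = PySem.List.pyGetD [3,3,1,1,2,2,4,4,5,5] (PySem.Int.mod iv.1 10) 0
  then (sc.1, sc.2.1, sc.2.2 + 1) else sc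

def solution (answers : List Int) : List Int :=
  let sc := (PySem.List.enumerate answers).foldl pvStepA (0, 0, 0)
  let score : List Int := [sc.1, sc.2.1, sc.2.2]
  (PySem.List.enumerate score).foldl
    (fun res jv => if jv.2 = (PySem.List.max? score (fun y => y)).getD 0 then res ++ [jv.1 + 1] else res) []

-- ===== PORT B =====
-- freq[k] = freq.get(k, 0) + 1 over k = (i % 40, v)
def pvFreq (answers : List Int) : PySem.Dict (Int × Int) Int :=
  (PySem.List.enumerate answers).foldl
    (fun d iv => d.insert (PySem.Int.mod iv.1 40, iv.2)
                   (d.getD (PySem.Int.mod iv.1 40, iv.2) 0 + 1))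
    PySem.Dict.empty

-- sum(freq.get((r, p[r % len(p)]), 0) for r in range(40))
def pvScore (freq : PySem.Dict (Int × Int) Int) (p : List Int) : Int :=
  ((PySem.List.pyRange 0 40 1).map
    (fun r => freq.getD (r, PySem.List.pyGetD p (PySem.Int.mod r (p.length : Int)) 0) 0)).sum

def solution_alt (answers : List Int) : List Int :=
  let freq := pvFreq answers
  let patterns : List (List Int) :=
    [[1,2,3,4,5], [2,1,2,3,2,4,2,5], [3,3,1,1,2,2,4,4,5,5]]
  let scores := patterns.map (pvScore freq)
  let best := (PySem.List.max? scores (fun y => y)).getD 0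
  ((PySem.List.enumerate scores).filter (fun jv => jv.2 = best)).map (fun jv => jv.1 + 1)

-- ===== PRECONDITION & SPEC =====
def Spec_solution (answers : List Int) (out : List Int) : Prop := out = solution_alt answers
instance (answers : List Int) (out : List Int) : Decidable (Spec_solution answers out) := by unfold Spec_solution; infer_instance

-- ===== CLAIM (what is proved, stated in full; the proofs are below) =====
def Claim_equal_solution : Prop := ∀ (answers : List Int), Dom_solution answers → Spec_solution answers (solution answers)

-- ===== LEMMAS AND PROOFS =====

-- A's interleaved accumulator equals the three independent indicator sums
theorem pvFold_eq (l : List (Int × Int)) (a b c : Int) :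
    l.foldl pvStepA (a, b, c) =
      (a + ((l.map (fun iv => if iv.2 = PySem.List.pyGetD [1,2,3,4,5] (PySem.Int.mod iv.1 5) 0 then (1:Int) else 0)).sum),
       b + ((l.map (fun iv => if iv.2 = PySem.List.pyGetD [2,1,2,3,2,4,2,5] (PySem.Int.mod iv.1 8) 0 then (1:Int) else 0)).sum),
       c + ((l.map (fun iv => if iv.2 = PySem.List.pyGetD [3,3,1,1,2,2,4,4,5,5] (PySem.Int.mod iv.1 10) 0 then (1:Int) else 0)).sum)) := by
  induction l generalizing a b c with
  | nil => simp
  | cons x xs ih =>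
    simp only [List.foldl_cons, List.map_cons, List.sum_cons]
    have hx : pvStepA (a, b, c) x =
        (a + (if x.2 = PySem.List.pyGetD [1,2,3,4,5] (PySem.Int.mod x.1 5) 0 then (1:Int) else 0),
         b + (if x.2 = PySem.List.pyGetD [2,1,2,3,2,4,2,5] (PySem.Int.mod x.1 8) 0 then (1:Int) else 0),
         c + (if x.2 = PySem.List.pyGetD [3,3,1,1,2,2,4,4,5,5] (PySem.Int.mod x.1 10) 0 then (1:Int) else 0)) := by
      unfold pvStepA; split_ifs <;> simp
    rw [hx, ih]
    ring_nf

-- sum over a nodup list of r of the indicator "x = (r, t r)" is one point-check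
theorem pvSumIte (t : Int → Int) (x : Int × Int) :
    ∀ R : List Int, R.Nodup →
    (R.map (fun r => if x = (r, t r) then (1:Int) else 0)).sum
      = if x.1 ∈ R ∧ x.2 = t x.1 then 1 else 0 := by
  intro R
  induction R with
  | nil => simp
  | cons r R ih =>
    intro hnd
    rcases List.nodup_cons.mp hnd with ⟨hr, hnd'⟩
    simp only [List.map_cons, List.sum_cons, ih hnd']
    by_cases hx : x = (r, t r)
    · subst hx
      simp [hr]
    · have h1 : ¬ (x.1 = r ∧ x.2 = t r) := by
        intro ⟨h, h'⟩; exact hx (Prod.ext h h')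
      by_cases hm : x.1 = r
      · have h2 : ¬ x.2 = t r := fun h => h1 ⟨hm, h⟩
        simp [hx, hm, hr, h2]
      · simp [hx, hm, List.mem_cons]

-- per-pattern: the indicator sum equals the residue-count sum over range(40)
theorem pvCountSum (p : List Int) (hpos : 0 < (p.length : Int)) (hdvd : (p.length : Int) ∣ 40) :
    ∀ l : List (Int × Int), (∀ iv ∈ l, 0 ≤ iv.1) →
    (l.map (fun iv => if iv.2 = PySem.List.pyGetD p (PySem.Int.mod iv.1 (p.length : Int)) 0 then (1:Int) else 0)).sum
      = ((PySem.List.pyRange 0 40 1).map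
          (fun r => ((l.map (fun iv => (PySem.Int.mod iv.1 40, iv.2))).count
                       (r, PySem.List.pyGetD p (PySem.Int.mod r (p.length : Int)) 0) : Int))).sum := by
  intro l
  induction l with
  | nil => simp
  | cons x xs ih =>
    intro hnn
    have hx0 : 0 ≤ x.1 := hnn x (List.mem_cons_self ..)
    have hxs := ih (fun iv hm => hnn iv (List.mem_cons_of_mem _ hm))
    simp only [List.map_cons, List.sum_cons]
    -- split the counts of the cons
    have hcnt : ∀ y : Int × Int,
        (((PySem.Int.mod x.1 40, x.2) :: xs.map (fun iv => (PySem.Int.mod iv.1 40, iv.2))).count y : Int)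
          = (xs.map (fun iv => (PySem.Int.mod iv.1 40, iv.2))).count y
            + (if (PySem.Int.mod x.1 40, x.2) = y then 1 else 0) := by
      intro y
      rw [List.count_cons]
      by_cases h : (PySem.Int.mod x.1 40, x.2) = y
      · simp [h.symm]
      · simp
    have hsplit :
        ((PySem.List.pyRange 0 40 1).map
          (fun r => ((((PySem.Int.mod x.1 40, x.2) :: xs.map (fun iv => (PySem.Int.mod iv.1 40, iv.2))).count
                       (r, PySem.List.pyGetD p (PySem.Int.mod r (p.length : Int)) 0)) : Int))).sum
          = ((PySem.List.pyRange 0 40 1).map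
              (fun r => ((xs.map (fun iv => (PySem.Int.mod iv.1 40, iv.2))).count
                           (r, PySem.List.pyGetD p (PySem.Int.mod r (p.length : Int)) 0) : Int))).sum
            + ((PySem.List.pyRange 0 40 1).map
                (fun r => if (PySem.Int.mod x.1 40, x.2)
                             = (r, PySem.List.pyGetD p (PySem.Int.mod r (p.length : Int)) 0) then (1:Int) else 0)).sum := by
      rw [← PySem.List.sum_map_add_int]
      exact congrArg List.sum (List.map_congr_left (fun r _ => hcnt _))
    rw [hsplit, ← hxs]
    -- the indicator sum over range(40) is the single point check at r = x.1 % 40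
    have hind :
        ((PySem.List.pyRange 0 40 1).map
            (fun r => if (PySem.Int.mod x.1 40, x.2)
                         = (r, PySem.List.pyGetD p (PySem.Int.mod r (p.length : Int)) 0) then (1:Int) else 0)).sum
          = if x.2 = PySem.List.pyGetD p (PySem.Int.mod x.1 (p.length : Int)) 0 then (1:Int) else 0 := by
      rw [pvSumIte (fun r => PySem.List.pyGetD p (PySem.Int.mod r (p.length : Int)) 0)
        (PySem.Int.mod x.1 40, x.2) (PySem.List.pyRange 0 40 1) (PySem.List.nodup_pyRange_one 0 40)]
      have hb1 : (0:Int) ≤ x.1 % 40 := Int.emod_nonneg _ (by norm_num)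
      have hb2 : x.1 % 40 < 40 := Int.emod_lt_of_pos _ (by norm_num)
      have hmm' : PySem.Int.mod (x.1 % 40) (p.length : Int) = PySem.Int.mod x.1 (p.length : Int) := by
        rw [PySem.Int.mod_eq_emod_of_pos hpos, PySem.Int.mod_eq_emod_of_pos hpos]
        exact Int.emod_emod_of_dvd x.1 hdvd
      simp [hb1, hb2, hmm']
    rw [hind]
    ring

-- indices produced by enumerate are nonnegative
theorem pvEnumNonneg (answers : List Int) :
    ∀ iv ∈ PySem.List.enumerate answers 0, 0 ≤ iv.1 := by
  intro iv hm
  rcases (PySem.List.mem_enumerate_iff answers 0 iv).mp hm with ⟨k, hk, rfl⟩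
  simp

-- B's table lookups are residue counts of the key list
theorem pvScore_eq (answers : List Int) (p : List Int) :
    pvScore (pvFreq answers) p
      = ((PySem.List.pyRange 0 40 1).map
          (fun r => (((PySem.List.enumerate answers 0).map (fun iv => (PySem.Int.mod iv.1 40, iv.2))).count
                       (r, PySem.List.pyGetD p (PySem.Int.mod r (p.length : Int)) 0) : Int))).sum := by
  have hfreq : pvFreq answers
      = PySem.Dict.counter ((PySem.List.enumerate answers 0).map (fun iv => (PySem.Int.mod iv.1 40, iv.2))) := by
    unfold pvFreq
    rw [← PySem.Dict.foldl_insert_getD_add_one_eq_counter, List.foldl_map]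
  unfold pvScore
  rw [hfreq]
  exact congrArg List.sum (List.map_congr_left (fun r _ => PySem.Dict.getD_counter _ _))

-- each of A's indicator sums is B's table score (length casts normalised per pattern)
theorem pvScoreA1 (answers : List Int) :
    ((PySem.List.enumerate answers 0).map
        (fun iv => if iv.2 = PySem.List.pyGetD [1,2,3,4,5] (PySem.Int.mod iv.1 5) 0 then (1:Int) else 0)).sum
      = pvScore (pvFreq answers) [1,2,3,4,5] := by
  rw [pvScore_eq]
  have h := pvCountSum [1,2,3,4,5] (by norm_num) (by norm_num)
    (PySem.List.enumerate answers 0) (pvEnumNonneg answers)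
  norm_num at h ⊢
  exact h

theorem pvScoreA2 (answers : List Int) :
    ((PySem.List.enumerate answers 0).map
        (fun iv => if iv.2 = PySem.List.pyGetD [2,1,2,3,2,4,2,5] (PySem.Int.mod iv.1 8) 0 then (1:Int) else 0)).sum
      = pvScore (pvFreq answers) [2,1,2,3,2,4,2,5] := by
  rw [pvScore_eq]
  have h := pvCountSum [2,1,2,3,2,4,2,5] (by norm_num) (by norm_num)
    (PySem.List.enumerate answers 0) (pvEnumNonneg answers)
  norm_num at h ⊢
  exact h

theorem pvScoreA3 (answers : List Int) :
    ((PySem.List.enumerate answers 0).map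
        (fun iv => if iv.2 = PySem.List.pyGetD [3,3,1,1,2,2,4,4,5,5] (PySem.Int.mod iv.1 10) 0 then (1:Int) else 0)).sum
      = pvScore (pvFreq answers) [3,3,1,1,2,2,4,4,5,5] := by
  rw [pvScore_eq]
  have h := pvCountSum [3,3,1,1,2,2,4,4,5,5] (by norm_num) (by norm_num)
    (PySem.List.enumerate answers 0) (pvEnumNonneg answers)
  norm_num at h ⊢
  exact h

-- the two result loops agree on any three-element score list
theorem pvResult_eq (x y z m : Int) :
    (PySem.List.enumerate [x, y, z]).foldl
      (fun res jv => if jv.2 = m then res ++ [jv.1 + 1] else res) [] =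
    ((PySem.List.enumerate [x, y, z]).filter (fun jv => jv.2 = m)).map
      (fun jv => jv.1 + 1) := by
  by_cases hx : x = m <;> by_cases hy : y = m <;> by_cases hz : z = m <;>
    simp [PySem.List.enumerate_cons, PySem.List.enumerate_nil, hx, hy, hz]

-- ===== VERDICT (by name: the statement is the Claim_ definition above) =====
theorem solution_spec : Claim_equal_solution := by
  intro answers _
  unfold Spec_solution solution solution_alt
  rw [pvFold_eq]
  simp only [List.map_cons, List.map_nil, zero_add, pvScoreA1, pvScoreA2, pvScoreA3]
  exact pvResult_eq _ _ _ _
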